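-- pv_equiv track=rewrite | github.com/piccoli/advent-of-code-2018-solutions | day02.py | count_two_and_three_occurrences
-- ===== SOURCE A (Python) =====
-- def count_two_and_three_occurrences(ids):
--     twos   = 0
--     threes = 0
--
--     for s in ids:
--         d = {}
--
--         for c in s:
--             d[c] = d.get(c, 0) + 1
--
--         twos   += int(any([ d[c] == 2 for c in s ]))
--         threes += int(any([ d[c] == 3 for c in s ]))
--
--     return twos * threes
-- ===== SOURCE B (Python) =====
-- def count_two_and_three_occurrences(ids):
--     twos = 0
--     threes = 0
--
--     for s in ids:
--         # sort the ID and scan contiguous runs of equal characters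
--         chars = sorted(s)
--         counts = []
--         if chars:
--             prev = chars[0]
--             run = 1
--             for c in chars[1:]:
--                 if c == prev:
--                     run += 1
--                 else:
--                     counts.append(run)
--                     prev = c
--                     run = 1
--             counts.append(run)
--         twos += int(2 in counts)
--         threes += int(3 in counts)
--
--     return twos * threes
-- ===== Notes on version B (the rewrite author's own statement) =====
-- stated objective: alternative
-- what changed: Per ID, instead of building a character->count dictionary and re-scanning the string twice with per-character dict lookups, B sorts the ID and scans it once for contiguous run lengths, then tests membership of 2 and 3 in the run-length list.
import Mathlib
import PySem

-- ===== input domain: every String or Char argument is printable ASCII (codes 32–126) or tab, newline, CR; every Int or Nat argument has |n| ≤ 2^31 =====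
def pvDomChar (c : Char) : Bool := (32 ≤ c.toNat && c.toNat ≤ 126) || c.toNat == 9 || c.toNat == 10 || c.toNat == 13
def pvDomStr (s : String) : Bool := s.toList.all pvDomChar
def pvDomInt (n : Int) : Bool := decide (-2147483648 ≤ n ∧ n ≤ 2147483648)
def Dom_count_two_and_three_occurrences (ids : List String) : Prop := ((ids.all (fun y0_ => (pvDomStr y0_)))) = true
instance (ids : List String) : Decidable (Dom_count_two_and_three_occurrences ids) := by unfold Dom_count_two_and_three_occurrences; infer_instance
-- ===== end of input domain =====

-- B replaces A's per-ID character-count dictionary by sorting the ID and scanning contiguous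
-- run lengths once (alternative algorithm, similar cost).

-- ===== PORT A =====
def count_two_and_three_occurrences (ids : List String) : Int :=
  let st := ids.foldl (fun (st : Int × Int) (s : String) =>
    let d := s.toList.foldl (fun d c => d.insert c (d.getD c 0 + 1)) (PySem.Dict.empty : PySem.Dict Char Int)
    let twos := st.1 + (if (s.toList.map (fun c => d.getD c 0 == 2)).any (fun b => b) then 1 else 0)
    let threes := st.2 + (if (s.toList.map (fun c => d.getD c 0 == 3)).any (fun b => b) then 1 else 0)
    (twos, threes)) (0, 0)
  st.1 * st.2

-- ===== PORT B =====
-- run-length scan of an already-sorted character list (Source B's inner loop; `prev`/`run` state)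
def rlGo (prev : Char) (run : Nat) : List Char → List Nat
  | [] => [run]
  | c :: rest => if c = prev then rlGo prev (run + 1) rest else run :: rlGo c 1 rest

def runLengths : List Char → List Nat
  | [] => []
  | c :: rest => rlGo c 1 rest

def count_two_and_three_occurrences_alt (ids : List String) : Int :=
  let st := ids.foldl (fun (st : Int × Int) s =>
    let counts := runLengths (PySem.List.sorted s.toList (fun c => c) false)
    (st.1 + (if 2 ∈ counts then 1 else 0), st.2 + (if 3 ∈ counts then 1 else 0))) (0, 0)
  st.1 * st.2

-- ===== PRECONDITION & SPEC =====
def Spec_count_two_and_three_occurrences (ids : List String) (out : Int) : Prop := out = count_two_and_three_occurrences_alt ids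
instance (ids : List String) (out : Int) : Decidable (Spec_count_two_and_three_occurrences ids out) := by unfold Spec_count_two_and_three_occurrences; infer_instance

-- ===== CLAIM (what is proved, stated in full; the proofs are below) =====
def Claim_equal_count_two_and_three_occurrences : Prop := ∀ (ids : List String), Dom_count_two_and_three_occurrences ids → Spec_count_two_and_three_occurrences ids (count_two_and_three_occurrences ids)

-- ===== LEMMAS AND PROOFS =====

-- rlGo on a sorted tail whose elements all dominate `prev`: the head run absorbs the
-- remaining copies of `prev`, the rest is the run-length list of the other characters.
theorem rlGo_spec (c : Char) (n : Nat) (xs : List Char)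
    (hs : xs.Pairwise (· ≤ ·)) (hle : ∀ x ∈ xs, c ≤ x) :
    rlGo c n xs = (n + xs.count c) :: runLengths (xs.filter (fun x => x != c)) := by
  induction xs generalizing c n with
  | nil => simp [rlGo, runLengths]
  | cons x t ih =>
    rcases List.pairwise_cons.mp hs with ⟨hxt, hts⟩
    by_cases hxc : x = c
    · subst hxc
      have := ih x (n + 1) hts hxt
      simp [rlGo, this]
      omega
    · have hcx : c < x := lt_of_le_of_ne (hle x (by simp)) (fun h => hxc h.symm)
      have hnot : c ∉ x :: t := by
        intro hmem
        rcases List.mem_cons.mp hmem with h | h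
        · exact hxc h.symm
        · exact absurd (lt_of_lt_of_le hcx (hxt c h)) (lt_irrefl c)
      have hcnt : (x :: t).count c = 0 := List.count_eq_zero.mpr hnot
      have hfil : (x :: t).filter (fun y => y != c) = x :: t := by
        apply List.filter_eq_self.mpr
        intro y hy
        simp only [bne_iff_ne, ne_eq]
        intro h; subst h; exact hnot hy
      simp [rlGo, hxc, hcnt, hfil, runLengths]

-- membership in the run-length list of a sorted list = some character occurs exactly k times
theorem mem_runLengths (l : List Char) (hs : l.Pairwise (· ≤ ·)) (k : Nat) :
    k ∈ runLengths l ↔ ∃ c ∈ l, l.count c = k := by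
  induction hn : l.length using Nat.strong_induction_on generalizing l with
  | _ n ih =>
    cases l with
    | nil => simp [runLengths]
    | cons x t =>
      rcases List.pairwise_cons.mp hs with ⟨hxt, hts⟩
      have hgo := rlGo_spec x 1 t hts hxt
      have hxnott : ∀ y ∈ t.filter (fun y => y != x), y ≠ x := by
        intro y hy
        have := List.of_mem_filter hy
        simpa [bne_iff_ne] using this
      have hflen : (t.filter (fun y => y != x)).length < n := by
        have := List.length_filter_le (fun y => y != x) t
        simp at hn; omega
      have hfp : (t.filter (fun y => y != x)).Pairwise (· ≤ ·) :=
        hts.sublist List.filter_sublist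
      have ihf := ih _ hflen (t.filter (fun y => y != x)) hfp rfl
      constructor
      · intro hk
        rw [runLengths, hgo] at hk
        rcases List.mem_cons.mp hk with h | h
        · exact ⟨x, by simp, by simp; omega⟩
        · rcases ihf.mp h with ⟨c, hc, hcnt⟩
          have hcx : c ≠ x := hxnott c hc
          have hct : c ∈ t := List.mem_of_mem_filter hc
          refine ⟨c, by simp [hct], ?_⟩
          have heq : (t.filter (fun y => y != x)).count c = t.count c := by
            rw [List.count_filter]; simp [hcx]
          rw [List.count_cons]
          simp only [heq] at hcnt
          have hne : x ≠ c := fun h => hcx h.symm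
          simp [hne, hcnt]
      · rintro ⟨c, hc, hcnt⟩
        rw [runLengths, hgo]
        by_cases hcx : c = x
        · subst hcx
          apply List.mem_cons.mpr
          left
          rw [List.count_cons_self] at hcnt
          omega
        · apply List.mem_cons.mpr
          right
          apply ihf.mpr
          have hct : c ∈ t := by
            rcases List.mem_cons.mp hc with h | h
            · exact absurd h hcx
            · exact h
          refine ⟨c, List.mem_filter.mpr ⟨hct, by simp [hcx]⟩, ?_⟩
          have heq : (t.filter (fun y => y != x)).count c = t.count c := by
            rw [List.count_filter]; simp [hcx]
          rw [heq]
          rw [List.count_cons] at hcnt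
          have hne : x ≠ c := fun h => hcx h.symm
          simpa [hne] using hcnt

-- A's per-ID test "some character's dictionary count is k" as an existence statement
theorem dictTest_iff (l : List Char) (k : Nat) :
    ((l.map (fun c => (l.foldl (fun d c => d.insert c (d.getD c 0 + 1)) (PySem.Dict.empty : PySem.Dict Char Int)).getD c 0 == (k : Int))).any (fun b => b)) = true
      ↔ ∃ c ∈ l, l.count c = k := by
  rw [PySem.Dict.foldl_insert_getD_add_one_eq_counter]
  simp only [List.any_map, List.any_eq_true, Function.comp, PySem.Dict.getD_counter]
  constructor
  · rintro ⟨c, hc, h⟩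
    refine ⟨c, hc, ?_⟩
    have := beq_iff_eq.mp h
    exact_mod_cast this
  · rintro ⟨c, hc, h⟩
    exact ⟨c, hc, beq_iff_eq.mpr (by exact_mod_cast h)⟩

-- B's per-ID test, reduced to the same existence statement
theorem runTest_iff (s : String) (k : Nat) :
    k ∈ runLengths (PySem.List.sorted s.toList (fun c => c) false) ↔ ∃ c ∈ s.toList, s.toList.count c = k := by
  have hperm : (PySem.List.sorted s.toList (fun c => c) false).Perm s.toList :=
    PySem.List.sorted_perm s.toList (fun c => c) false
  have hpw : (PySem.List.sorted s.toList (fun c => c) false).Pairwise (· ≤ ·) :=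
    PySem.List.sorted_pairwise s.toList (fun c => c)
  rw [mem_runLengths _ hpw]
  constructor
  · rintro ⟨c, hc, hcnt⟩
    exact ⟨c, hperm.mem_iff.mp hc, by rw [← hperm.count_eq]; exact hcnt⟩
  · rintro ⟨c, hc, hcnt⟩
    exact ⟨c, hperm.mem_iff.mpr hc, by rw [hperm.count_eq]; exact hcnt⟩

theorem step_eq : (fun (st : Int × Int) s =>
    let d := s.toList.foldl (fun d c => d.insert c (d.getD c 0 + 1)) (PySem.Dict.empty : PySem.Dict Char Int)
    let twos := st.1 + (if (s.toList.map (fun c => d.getD c 0 == 2)).any (fun b => b) then 1 else 0)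
    let threes := st.2 + (if (s.toList.map (fun c => d.getD c 0 == 3)).any (fun b => b) then 1 else 0)
    ((twos, threes) : Int × Int))
    = (fun (st : Int × Int) (s : String) =>
    let counts := runLengths (PySem.List.sorted s.toList (fun c => c) false)
    (st.1 + (if 2 ∈ counts then 1 else 0), st.2 + (if 3 ∈ counts then 1 else 0))) := by
  funext st s
  have h2 : ((s.toList.map (fun c => (s.toList.foldl (fun d c => d.insert c (d.getD c 0 + 1)) (PySem.Dict.empty : PySem.Dict Char Int)).getD c 0 == (2 : Int))).any (fun b => b)) = true
      ↔ (2 : Nat) ∈ runLengths (PySem.List.sorted s.toList (fun c => c) false) :=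
    (dictTest_iff s.toList 2).trans (runTest_iff s 2).symm
  have h3 : ((s.toList.map (fun c => (s.toList.foldl (fun d c => d.insert c (d.getD c 0 + 1)) (PySem.Dict.empty : PySem.Dict Char Int)).getD c 0 == (3 : Int))).any (fun b => b)) = true
      ↔ (3 : Nat) ∈ runLengths (PySem.List.sorted s.toList (fun c => c) false) :=
    (dictTest_iff s.toList 3).trans (runTest_iff s 3).symm
  dsimp only
  exact congrArg₂ Prod.mk (congrArg (st.1 + ·) (if_congr h2 rfl rfl)) (congrArg (st.2 + ·) (if_congr h3 rfl rfl))

-- ===== VERDICT (by name: the statement is the Claim_ definition above) =====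
theorem count_two_and_three_occurrences_spec : Claim_equal_count_two_and_three_occurrences := by
  intro ids _
  unfold Spec_count_two_and_three_occurrences count_two_and_three_occurrences count_two_and_three_occurrences_alt
  rw [step_eq]
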